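-- pv_equiv track=rewrite | github.com/ChenGolz/merged2 | hanit1/app/main.py | _parse_bulk_links
-- ===== SOURCE A (Python) =====
-- def _parse_bulk_links(raw: str) -> list[str]:
--     links = []
--     for line in raw.splitlines():
--         line = line.strip()
--         if line and (line.startswith("http://") or line.startswith("https://")):
--             links.append(line)
--     out = []
--     seen = set()
--     for link in links:
--         if link not in seen:
--             seen.add(link)
--             out.append(link)
--     return out
-- ===== SOURCE B (Python) =====
-- def _parse_bulk_links(raw: str) -> list[str]:
--     # Back-to-front nub: walk the lines in reverse; prepend each candidate link
--     # and drop its later duplicates from the result built so far. No seen-set.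
--     out = []
--     for line in reversed(raw.splitlines()):
--         s = line.strip()
--         if s and (s.startswith("http://") or s.startswith("https://")):
--             out = [s] + [x for x in out if x != s]
--     return out
-- ===== Notes on version B (the rewrite author's own statement) =====
-- stated objective: alternative
-- what changed: Replaces A's forward filter-then-seen-set dedup with a back-to-front nub: iterate the lines in reverse, prepending each candidate link and filtering its later duplicates out of the accumulator, so no seen set and no intermediate filtered list exist.
import Mathlib
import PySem

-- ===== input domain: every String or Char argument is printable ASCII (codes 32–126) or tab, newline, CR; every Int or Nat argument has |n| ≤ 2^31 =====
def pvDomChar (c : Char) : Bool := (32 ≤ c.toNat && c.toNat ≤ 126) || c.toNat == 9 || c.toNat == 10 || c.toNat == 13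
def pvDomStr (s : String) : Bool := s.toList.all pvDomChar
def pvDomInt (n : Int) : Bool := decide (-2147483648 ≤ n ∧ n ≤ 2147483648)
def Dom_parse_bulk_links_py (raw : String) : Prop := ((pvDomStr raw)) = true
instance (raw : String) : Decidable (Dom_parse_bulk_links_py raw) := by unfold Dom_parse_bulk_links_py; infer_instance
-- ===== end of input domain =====

-- B replaces A's forward filter + seen-set dedup with a back-to-front nub over the reversed
-- lines (prepend each candidate, filter its duplicates out of the accumulator); objective: alternative.

-- ===== PORT A =====
def parse_bulk_links_py (raw : String) : List String :=
  let links := (PySem.Str.splitlines raw).foldl (fun links line =>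
      let line := PySem.Str.strip line
      if line ≠ "" ∧ (PySem.Str.startswith line "http://" = true ∨ PySem.Str.startswith line "https://" = true)
      then links ++ [line] else links) []
  let st := links.foldl (fun (st : List String × PySem.Set String) link =>
      if PySem.Set.contains st.2 link then st
      else (st.1 ++ [link], PySem.Set.add st.2 link)) ([], PySem.Set.empty)
  st.1

-- ===== PORT B =====
def parse_bulk_links_py_alt (raw : String) : List String :=
  ((PySem.Str.splitlines raw).reverse).foldl (fun out line =>
      let s := PySem.Str.strip line
      if s ≠ "" ∧ (PySem.Str.startswith s "http://" = true ∨ PySem.Str.startswith s "https://" = true)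
      then s :: out.filter (fun x => x ≠ s)
      else out) []

-- ===== PRECONDITION & SPEC =====
def Spec_parse_bulk_links_py (raw : String) (out : List String) : Prop := out = parse_bulk_links_py_alt raw
instance (raw : String) (out : List String) : Decidable (Spec_parse_bulk_links_py raw out) := by unfold Spec_parse_bulk_links_py; infer_instance

-- ===== CLAIM =====
def Claim_equal_parse_bulk_links_py : Prop := ∀ (raw : String), Dom_parse_bulk_links_py raw → Spec_parse_bulk_links_py raw (parse_bulk_links_py raw)

-- ===== LEMMAS AND PROOFS =====

lemma foldA_eq_update (links : List String) (s : List String) :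
    (links.foldl (fun (st : List String × PySem.Set String) link =>
      if PySem.Set.contains st.2 link then st
      else (st.1 ++ [link], PySem.Set.add st.2 link)) (s, s)).1 = PySem.Set.update s links := by
  induction links generalizing s with
  | nil => simp [PySem.Set.update]
  | cons a l ih =>
    cases h : PySem.Set.contains s a with
    | true =>
      have hadd : PySem.Set.add s a = s := by simp only [PySem.Set.add, h, if_true]
      simp only [PySem.Set.update, List.foldl_cons, h, if_true, hadd]
      exact ih s
    | false =>
      simp only [PySem.Set.update, List.foldl_cons, h, Bool.false_eq_true, if_false]
      have hadd : PySem.Set.add s a = s ++ [a] := by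
        simp only [PySem.Set.add, h, Bool.false_eq_true, if_false]
      rw [hadd]
      simpa [PySem.Set.update] using ih (s ++ [a])

lemma dedup_cons (a : String) (l : List String) :
    PySem.List.dedup (a :: l) = a :: (PySem.List.dedup l).filter (fun y => y ≠ a) := by
  have h1 : PySem.Set.ofList (a :: l) = PySem.Set.update [a] l := by
    simp [PySem.Set.ofList_eq_foldl, PySem.Set.update, PySem.Set.add, PySem.Set.contains]
  have h2 : PySem.Set.update ([a] : List String) l
      = [a] ++ (PySem.Set.ofList l).filter (fun y => !(PySem.Set.contains [a] y)) :=
    PySem.Set.update_eq_append_filter _ _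
  simp only [PySem.List.dedup_eq_ofList, h1, h2, List.cons_append, List.nil_append]
  congr 1
  apply List.filter_congr
  intro y _
  simp [PySem.Set.contains]

lemma dedup_eq_foldr_nub (lines : List String) :
    PySem.List.dedup
      (((lines.filter (fun line => PySem.Str.strip line ≠ "" ∧
          (PySem.Str.startswith (PySem.Str.strip line) "http://" = true ∨
           PySem.Str.startswith (PySem.Str.strip line) "https://" = true))).map PySem.Str.strip))
    = lines.foldr (fun line out =>
        if PySem.Str.strip line ≠ "" ∧
            (PySem.Str.startswith (PySem.Str.strip line) "http://" = true ∨
             PySem.Str.startswith (PySem.Str.strip line) "https://" = true)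
        then PySem.Str.strip line :: out.filter (fun x => x ≠ PySem.Str.strip line)
        else out) [] := by
  induction lines with
  | nil => simp [PySem.List.dedup, PySem.Set.ofList]
  | cons a l ih =>
    by_cases h : PySem.Str.strip a ≠ "" ∧
        (PySem.Str.startswith (PySem.Str.strip a) "http://" = true ∨
         PySem.Str.startswith (PySem.Str.strip a) "https://" = true)
    · rw [List.foldr_cons, if_pos h, List.filter_cons, if_pos (by exact decide_eq_true h),
        List.map_cons, dedup_cons, ih]
    · rw [List.foldr_cons, if_neg h, List.filter_cons, if_neg (by simpa using h), ih]

-- ===== VERDICT =====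
theorem parse_bulk_links_py_spec : Claim_equal_parse_bulk_links_py := by
  intro raw _
  unfold Spec_parse_bulk_links_py parse_bulk_links_py parse_bulk_links_py_alt
  simp only []
  rw [PySem.List.foldl_ite_eq_foldl_filter
        (p := fun line => PySem.Str.strip line ≠ "" ∧
          (PySem.Str.startswith (PySem.Str.strip line) "http://" = true ∨
           PySem.Str.startswith (PySem.Str.strip line) "https://" = true))
        (f := fun (links : List String) line => links ++ [PySem.Str.strip line]),
      PySem.List.foldl_append_singleton_eq_map, List.nil_append]
  rw [List.foldl_reverse]
  simp only [PySem.Set.empty]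
  rw [foldA_eq_update]
  have hupd : ∀ (xs : List String), PySem.Set.update ([] : PySem.Set String) xs = PySem.List.dedup xs := by
    intro xs
    simp [PySem.List.dedup_eq_ofList, PySem.Set.ofList_eq_foldl, PySem.Set.update]
  rw [hupd, dedup_eq_foldr_nub]
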